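-- pv_equiv track=rewrite | github.com/Alfthrpy/stegano-f5-dmcs | steno.py | _string_to_bits
-- ===== SOURCE A (Python) =====
-- def _string_to_bits(text):
--     """Konversi string ke bit array dengan length header"""
--     # Tambahkan length header (32 bit untuk panjang string)
--     length = len(text)
--     length_bits = []
--     for i in range(32):
--         length_bits.append((length >> (31-i)) & 1)
--
--     # Konversi string ke bits
--     text_bits = []
--     for char in text:
--         byte_val = ord(char)
--         for i in range(8):
--             text_bits.append((byte_val >> (7-i)) & 1)
--
--     return length_bits + text_bits
-- ===== SOURCE B (Python) =====
-- def _word_bits(n, w):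
--     """Low w bits of n, MSB first, built back-to-front by repeated divmod."""
--     if w == 0:
--         return []
--     n, b = divmod(n, 2)
--     return _word_bits(n, w - 1) + [b]
--
--
-- def _string_to_bits(text):
--     """Konversi string ke bit array dengan length header"""
--     out = _word_bits(len(text), 32)
--     for char in text:
--         out += _word_bits(ord(char), 8)
--     return out
-- ===== Notes on version B (the rewrite author's own statement) =====
-- stated objective: simpler
-- what changed: Replaces A's two indexed shift-and-mask loops (computing bit (w-1-i) for each position i) with one recursive divmod helper that peels bits LSB-first and builds each word's bit list back-to-front, shared by the header and the characters.
import Mathlib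
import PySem

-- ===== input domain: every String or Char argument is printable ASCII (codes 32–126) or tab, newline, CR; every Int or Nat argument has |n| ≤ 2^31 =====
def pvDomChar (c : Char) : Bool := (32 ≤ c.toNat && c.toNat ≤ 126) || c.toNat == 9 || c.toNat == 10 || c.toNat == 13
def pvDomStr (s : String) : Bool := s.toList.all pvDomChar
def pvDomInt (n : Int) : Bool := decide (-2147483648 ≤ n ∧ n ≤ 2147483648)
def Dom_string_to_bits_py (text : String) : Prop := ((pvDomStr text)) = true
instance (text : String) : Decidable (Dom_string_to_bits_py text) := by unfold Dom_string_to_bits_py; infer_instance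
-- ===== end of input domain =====

-- B replaces A's indexed shift-and-mask loops with one recursive divmod helper
-- building each word's bits back-to-front (objective: simpler).

-- ===== PORT A =====
def string_to_bits_py (text : String) : List Int :=
  let length : Int := text.toList.length
  let lengthBits : List Int :=
    (PySem.List.pyRange 0 32 1).foldl
      (fun acc i => acc ++ [PySem.Int.band (length >>> (31 - i).toNat) 1]) []
  let textBits : List Int :=
    text.toList.foldl
      (fun acc char =>
        let byteVal : Int := char.toNat
        (PySem.List.pyRange 0 8 1).foldl
          (fun acc2 i => acc2 ++ [PySem.Int.band (byteVal >>> (7 - i).toNat) 1]) acc) []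
  lengthBits ++ textBits

-- ===== PORT B =====
def wordBits (n : Int) (w : Nat) : List Int :=
  match w with
  | 0 => []
  | w + 1 => wordBits (PySem.Int.floordiv n 2) w ++ [PySem.Int.mod n 2]

def string_to_bits_py_alt (text : String) : List Int :=
  text.toList.foldl
    (fun out char => out ++ wordBits (char.toNat : Int) 8)
    (wordBits (text.toList.length : Int) 32)

-- ===== PRECONDITION & SPEC =====
def Spec_string_to_bits_py (text : String) (out : List Int) : Prop := out = string_to_bits_py_alt text
instance (text : String) (out : List Int) : Decidable (Spec_string_to_bits_py text out) := by unfold Spec_string_to_bits_py; infer_instance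

-- ===== CLAIM (what is proved, stated in full; the proofs are below) =====
def Claim_equal_string_to_bits_py : Prop := ∀ (text : String), Dom_string_to_bits_py text → Spec_string_to_bits_py text (string_to_bits_py text)

-- ===== LEMMAS AND PROOFS =====

lemma wordBits_natCast (w : Nat) : ∀ (n : Nat),
    (PySem.List.pyRange 0 (w : Int) 1).map
      (fun i => PySem.Int.band ((n : Int) >>> ((w : Int) - 1 - i).toNat) 1)
    = wordBits (n : Int) w := by
  induction w with
  | zero => intro n; simp [wordBits]
  | succ w ih =>
    intro n
    have hcast : ((w + 1 : Nat) : Int) = (w : Int) + 1 := by push_cast; ring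
    rw [hcast, PySem.List.pyRange_one_succ_right (by positivity), List.map_append,
      List.map_cons, List.map_nil]
    have h1 := PySem.Int.band_natCast n 1
    rw [Nat.cast_one] at h1
    have hlast : PySem.Int.band ((n : Int) >>> (((w : Int) + 1) - 1 - (w : Int)).toNat) 1
        = PySem.Int.mod (n : Int) 2 := by
      have h0 : (((w : Int) + 1) - 1 - (w : Int)).toNat = 0 := by omega
      rw [h0, ← Int.natCast_shiftRight, Nat.shiftRight_zero, h1, Nat.and_one_is_mod]
      exact_mod_cast (PySem.Int.mod_natCast n 2).symm
    have hfront : (PySem.List.pyRange 0 (w : Int) 1).map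
        (fun i => PySem.Int.band ((n : Int) >>> (((w : Int) + 1) - 1 - i).toNat) 1)
        = wordBits (PySem.Int.floordiv (n : Int) 2) w := by
      have hd : PySem.Int.floordiv (n : Int) 2 = ((n / 2 : Nat) : Int) := by
        exact_mod_cast PySem.Int.floordiv_natCast n 2
      rw [hd, ← ih (n / 2)]
      apply List.map_congr_left
      intro i hi
      have hmem := (PySem.List.mem_pyRange_one).mp hi
      have hk : (((w : Int) + 1) - 1 - i).toNat = ((w : Int) - 1 - i).toNat + 1 := by omega
      rw [hk, ← Int.natCast_shiftRight, Nat.shiftRight_succ_inside, Int.natCast_shiftRight]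
    rw [hfront, hlast]
    simp [wordBits]

lemma wordBits_byte (m : Nat) :
    (PySem.List.pyRange 0 8 1).map (fun i => PySem.Int.band ((m : Int) >>> (7 - i).toNat) 1)
    = wordBits (m : Int) 8 := by
  have h := wordBits_natCast 8 m
  norm_num at h
  exact h

lemma textBits_eq (l : List Char) : ∀ (init : List Int),
    l.foldl (fun acc char =>
        (PySem.List.pyRange 0 8 1).foldl
          (fun acc2 i => acc2 ++ [PySem.Int.band ((char.toNat : Int) >>> (7 - i).toNat) 1]) acc) init
    = l.foldl (fun out char => out ++ wordBits (char.toNat : Int) 8) init := by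
  induction l with
  | nil => intro init; rfl
  | cons c l ih =>
    intro init
    simp only [List.foldl_cons]
    rw [PySem.List.foldl_append_singleton_eq_map, wordBits_byte, ih]

-- ===== VERDICT (by name: the statement is the Claim_ definition above) =====
theorem string_to_bits_py_spec : Claim_equal_string_to_bits_py := by
  intro text _
  unfold Spec_string_to_bits_py string_to_bits_py string_to_bits_py_alt
  dsimp only
  rw [PySem.List.foldl_append_singleton_eq_map, List.nil_append]
  have hlen : (PySem.List.pyRange 0 32 1).map
      (fun i => PySem.Int.band ((text.toList.length : Int) >>> (31 - i).toNat) 1)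
      = wordBits (text.toList.length : Int) 32 := by
    have h := wordBits_natCast 32 text.toList.length
    norm_num at h
    exact h
  rw [hlen, textBits_eq, PySem.List.foldl_append_eq_flatMap,
    PySem.List.foldl_append_eq_flatMap, List.nil_append]
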